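-- pv_equiv track=rewrite | github.com/polaris-media/videofy | fetchers/polaris-capi/fetcher.py | _media_kind_from_hint_values
-- ===== SOURCE A (Python) =====
-- def _media_kind_from_hint_values(values: list[str]) -> str | None:
--     hint = " ".join(value.lower() for value in values if value)
--     if not hint:
--         return None
--     if any(token in hint for token in ("video", "clip", "mp4", "mov", "webm")):
--         return "video"
--     if any(token in hint for token in ("image", "photo", "picture", "jpeg", "jpg", "png", "webp", "gif")):
--         return "image"
--     return None
-- ===== SOURCE B (Python) =====
-- _VIDEO_TOKENS = ("video", "clip", "mp4", "mov", "webm")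
-- _IMAGE_TOKENS = ("image", "photo", "picture", "jpeg", "jpg", "png", "webp", "gif")
--
--
-- def _media_kind_from_hint_values(values: list[str]) -> str | None:
--     has_video = False
--     has_image = False
--     for value in values:
--         if not value:
--             continue
--         v = value.lower()
--         if any(token in v for token in _VIDEO_TOKENS):
--             has_video = True
--         if any(token in v for token in _IMAGE_TOKENS):
--             has_image = True
--     if has_video:
--         return "video"
--     if has_image:
--         return "image"
--     return None
-- ===== Notes on version B (the rewrite author's own statement) =====
-- stated objective: alternative
-- what changed: B drops the joined-string construction entirely: one pass over the values sets has_video/has_image flags per value (tokens contain no space, so they can never straddle the join separator), and the decision is made after the loop to keep the video-over-image priority.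
import Mathlib
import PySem

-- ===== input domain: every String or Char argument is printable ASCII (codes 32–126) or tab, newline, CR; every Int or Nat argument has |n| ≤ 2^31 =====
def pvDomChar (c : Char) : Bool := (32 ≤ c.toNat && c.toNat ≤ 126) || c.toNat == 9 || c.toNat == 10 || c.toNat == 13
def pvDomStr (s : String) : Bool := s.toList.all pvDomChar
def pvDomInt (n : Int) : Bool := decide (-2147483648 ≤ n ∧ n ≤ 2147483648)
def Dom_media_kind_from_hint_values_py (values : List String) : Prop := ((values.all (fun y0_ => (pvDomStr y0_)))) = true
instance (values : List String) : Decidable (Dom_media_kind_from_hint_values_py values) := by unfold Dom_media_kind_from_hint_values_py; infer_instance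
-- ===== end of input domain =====

-- B replaces A's joined-string construction by a single pass over the values that sets
-- has_video/has_image flags per value (same tokens, decision deferred after the loop); objective: alternative.

-- ===== PORT A =====
def media_kind_from_hint_values_py (values : List String) : Option String :=
  let hint := PySem.Str.join " " ((values.filter (fun v => v != "")).map PySem.Str.lower)
  if hint = "" then none
  else if (["video", "clip", "mp4", "mov", "webm"] : List String).any
      (fun t => PySem.Str.isIn t hint) then some "video"
  else if (["image", "photo", "picture", "jpeg", "jpg", "png", "webp", "gif"] : List String).any
      (fun t => PySem.Str.isIn t hint) then some "image"
  else none

-- ===== PORT B =====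
def pvVidTokens : List String := ["video", "clip", "mp4", "mov", "webm"]
def pvImgTokens : List String := ["image", "photo", "picture", "jpeg", "jpg", "png", "webp", "gif"]

-- one loop iteration of B: skip falsy value, else lowercase once and update both flags
def pvStep (acc : Bool × Bool) (value : String) : Bool × Bool :=
  if value != "" then
    let v := PySem.Str.lower value
    ((if pvVidTokens.any (fun t => PySem.Str.isIn t v) then true else acc.1),
     (if pvImgTokens.any (fun t => PySem.Str.isIn t v) then true else acc.2))
  else acc

def media_kind_from_hint_values_py_alt (values : List String) : Option String :=
  let flags := values.foldl pvStep (false, false)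
  if flags.1 then some "video"
  else if flags.2 then some "image"
  else none

-- ===== PRECONDITION & SPEC =====
def Spec_media_kind_from_hint_values_py (values : List String) (out : Option String) : Prop := out = media_kind_from_hint_values_py_alt values
instance (values : List String) (out : Option String) : Decidable (Spec_media_kind_from_hint_values_py values out) := by unfold Spec_media_kind_from_hint_values_py; infer_instance

-- ===== CLAIM (what is proved, stated in full; the proofs are below) =====
def Claim_equal_media_kind_from_hint_values_py : Prop := ∀ (values : List String), Dom_media_kind_from_hint_values_py values → Spec_media_kind_from_hint_values_py values (media_kind_from_hint_values_py values)

-- ===== LEMMAS AND PROOFS =====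

-- a space-free pattern that is a prefix of `a ++ ' ' :: b` is a prefix of `a`
lemma pv_prefix_of_no_sep : ∀ (t a b : List Char), (' ' : Char) ∉ t → t <+: a ++ ' ' :: b → t <+: a := by
  intro t
  induction t with
  | nil => intro a b _ _; exact List.nil_prefix
  | cons c t' ih =>
    intro a b hns hp
    cases a with
    | nil =>
      rw [List.nil_append, List.cons_prefix_cons] at hp
      obtain ⟨rfl, -⟩ := hp
      exact absurd List.mem_cons_self hns
    | cons d a' =>
      rw [List.cons_append, List.cons_prefix_cons] at hp
      obtain ⟨rfl, hp'⟩ := hp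
      exact List.cons_prefix_cons.mpr ⟨rfl, ih a' b (fun h => hns (List.mem_cons_of_mem _ h)) hp'⟩

-- a space-free infix of `a ++ ' ' :: b` cannot straddle the separator
lemma pv_infix_sep_mp : ∀ (a t b : List Char), (' ' : Char) ∉ t →
    t <:+: a ++ ' ' :: b → t <:+: a ∨ t <:+: b := by
  intro a
  induction a with
  | nil =>
    intro t b hns h
    rw [List.nil_append, List.infix_cons_iff] at h
    rcases h with h | h
    · cases t with
      | nil => exact Or.inl List.nil_infix
      | cons c t' =>
        rw [List.cons_prefix_cons] at h
        obtain ⟨rfl, -⟩ := h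
        exact absurd List.mem_cons_self hns
    · exact Or.inr h
  | cons x a' ih =>
    intro t b hns h
    rw [List.cons_append, List.infix_cons_iff] at h
    rcases h with h | h
    · cases t with
      | nil => exact Or.inl List.nil_infix
      | cons c t' =>
        rw [List.cons_prefix_cons] at h
        obtain ⟨rfl, hp⟩ := h
        have hpa : t' <+: a' := pv_prefix_of_no_sep t' a' b (fun hm => hns (List.mem_cons_of_mem _ hm)) hp
        exact Or.inl (List.cons_prefix_cons.mpr ⟨rfl, hpa⟩).isInfix
    · rcases ih t b hns h with h' | h'
      · exact Or.inl (h'.trans (List.suffix_cons x a').isInfix)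
      · exact Or.inr h'

-- a nonempty space-free pattern is in the space-join iff it is in one of the parts
lemma pv_infix_join : ∀ (parts : List (List Char)) (t : List Char), (' ' : Char) ∉ t → t ≠ [] →
    (t <:+: PySem.Chars.join [' '] parts ↔ ∃ p ∈ parts, t <:+: p) := by
  intro parts
  induction parts with
  | nil =>
    intro t hns hne
    rw [PySem.Chars.join_nil]
    simp [List.infix_nil, hne]
  | cons p rest ih =>
    intro t hns hne
    cases rest with
    | nil => rw [PySem.Chars.join_singleton]; simp
    | cons q rest' =>
      rw [PySem.Chars.join_cons_cons]
      have hre : p ++ [' '] ++ PySem.Chars.join [' '] (q :: rest') =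
          p ++ ' ' :: PySem.Chars.join [' '] (q :: rest') := by simp
      rw [hre]
      constructor
      · intro h
        rcases pv_infix_sep_mp p t _ hns h with h | h
        · exact ⟨p, List.mem_cons_self, h⟩
        · obtain ⟨r, hr, hir⟩ := (ih t hns hne).mp h
          exact ⟨r, List.mem_cons_of_mem _ hr, hir⟩
      · rintro ⟨r, hr, hir⟩
        rcases List.mem_cons.mp hr with rfl | hr'
        · exact hir.trans (List.prefix_append _ _).isInfix
        · exact ((ih t hns hne).mpr ⟨r, hr', hir⟩).trans
            ((List.suffix_cons _ _).trans (List.suffix_append _ _)).isInfix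

-- per-value flags of B
def pvHasVid (v : String) : Bool := v != "" && pvVidTokens.any (fun t => PySem.Str.isIn t (PySem.Str.lower v))
def pvHasImg (v : String) : Bool := v != "" && pvImgTokens.any (fun t => PySem.Str.isIn t (PySem.Str.lower v))

lemma pvStep_fst (acc : Bool × Bool) (v : String) : (pvStep acc v).1 = (acc.1 || pvHasVid v) := by
  by_cases hv : (v != "") = true <;>
    simp only [Bool.not_eq_true] at hv <;>
      simp [pvStep, pvHasVid, hv]
  all_goals
    rw [Bool.or_comm]
    congr 1
    rw [Bool.eq_iff_iff]
    simp [List.any_eq_true]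

lemma pvStep_snd (acc : Bool × Bool) (v : String) : (pvStep acc v).2 = (acc.2 || pvHasImg v) := by
  by_cases hv : (v != "") = true <;>
    simp only [Bool.not_eq_true] at hv <;>
      simp [pvStep, pvHasImg, hv]
  all_goals
    rw [Bool.or_comm]
    congr 1
    rw [Bool.eq_iff_iff]
    simp [List.any_eq_true]

lemma pv_foldl_flags : ∀ (l : List String) (acc : Bool × Bool),
    l.foldl pvStep acc = (acc.1 || l.any pvHasVid, acc.2 || l.any pvHasImg) := by
  intro l
  induction l with
  | nil => intro acc; simp
  | cons v l ih =>
    intro acc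
    rw [List.foldl_cons, ih, List.any_cons, List.any_cons]
    rw [pvStep_fst, pvStep_snd, Bool.or_assoc, Bool.or_assoc]

-- the crux: A's token-in-joined-hint test equals B's per-value test
lemma pv_any_token (values tokens : List String)
    (htok : ∀ t ∈ tokens, (' ' : Char) ∉ t.toList ∧ t.toList ≠ []) :
    tokens.any (fun t => PySem.Str.isIn t (PySem.Str.join " " ((values.filter (fun v => v != "")).map PySem.Str.lower)))
      = values.any (fun v => v != "" && tokens.any (fun t => PySem.Str.isIn t (PySem.Str.lower v))) := by
  rw [Bool.eq_iff_iff]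
  have hsep : (" " : String).toList = [' '] := rfl
  simp only [List.any_eq_true, Bool.and_eq_true, PySem.Str.isIn_eq, PySem.Chars.isIn_iff_infix,
    PySem.Str.toList_join, hsep, List.map_map, Function.comp_def, PySem.Str.toList_lower]
  constructor
  · rintro ⟨t, ht, hinf⟩
    obtain ⟨p, hp, hip⟩ := (pv_infix_join _ t.toList (htok t ht).1 (htok t ht).2).mp hinf
    obtain ⟨v, hv, rfl⟩ := List.mem_map.mp hp
    obtain ⟨hvmem, hvne⟩ := List.mem_filter.mp hv
    exact ⟨v, hvmem, hvne, t, ht, hip⟩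
  · rintro ⟨v, hv, hvne, t, ht, hip⟩
    refine ⟨t, ht, (pv_infix_join _ t.toList (htok t ht).1 (htok t ht).2).mpr ?_⟩
    exact ⟨PySem.Chars.lower v.toList, List.mem_map.mpr ⟨v, List.mem_filter.mpr ⟨hv, hvne⟩, rfl⟩, hip⟩

-- ===== VERDICT (by name: the statement is the Claim_ definition above) =====
theorem media_kind_from_hint_values_py_spec : Claim_equal_media_kind_from_hint_values_py := by
  intro values _
  unfold Spec_media_kind_from_hint_values_py media_kind_from_hint_values_py media_kind_from_hint_values_py_alt
  rw [pv_foldl_flags]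
  simp only [Bool.false_or]
  rw [pv_any_token values ["video", "clip", "mp4", "mov", "webm"] (by decide),
      pv_any_token values ["image", "photo", "picture", "jpeg", "jpg", "png", "webp", "gif"] (by decide)]
  have eV : (fun v => v != "" && (["video", "clip", "mp4", "mov", "webm"] : List String).any
      (fun t => PySem.Str.isIn t (PySem.Str.lower v))) = pvHasVid := rfl
  have eI : (fun v => v != "" && (["image", "photo", "picture", "jpeg", "jpg", "png", "webp", "gif"] : List String).any
      (fun t => PySem.Str.isIn t (PySem.Str.lower v))) = pvHasImg := rfl
  rw [eV, eI]
  by_cases hh : PySem.Str.join " " ((values.filter (fun v => v != "")).map PySem.Str.lower) = ""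
  · have h1 : values.any pvHasVid = false := by
      rw [← eV, ← pv_any_token values _ (by decide), hh]; decide
    have h2 : values.any pvHasImg = false := by
      rw [← eI, ← pv_any_token values _ (by decide), hh]; decide
    rw [if_pos hh, h1, h2]
    rfl
  · rw [if_neg hh]
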